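-- pv_equiv track=rewrite | github.com/yz-joey/yz-joey.github.io | files/f-w10-ws-sol.py | noZeroLists_rec
-- ===== SOURCE A (Python) =====
-- def noZeroLists_rec(l):
--     if l == []:
--         return []
--     else:
--         head = l[0]
--         tail = l[1:]
--         tailRes = noZeroLists_rec(tail)
--         if not 0 in head:
--             return [head] + tailRes
--         else:
--             return tailRes
-- ===== SOURCE B (Python) =====
-- def noZeroLists_rec(l):
--     result = []
--     for head in l:
--         if 0 not in head:
--             result.append(head)
--     return result
-- ===== Notes on version B (the rewrite author's own statement) =====
-- stated objective: idiomatic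
-- what changed: Replaced the head/tail structural recursion building the result by list concatenation with a single iterative pass appending qualifying sublists to an accumulator.
import Mathlib
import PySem

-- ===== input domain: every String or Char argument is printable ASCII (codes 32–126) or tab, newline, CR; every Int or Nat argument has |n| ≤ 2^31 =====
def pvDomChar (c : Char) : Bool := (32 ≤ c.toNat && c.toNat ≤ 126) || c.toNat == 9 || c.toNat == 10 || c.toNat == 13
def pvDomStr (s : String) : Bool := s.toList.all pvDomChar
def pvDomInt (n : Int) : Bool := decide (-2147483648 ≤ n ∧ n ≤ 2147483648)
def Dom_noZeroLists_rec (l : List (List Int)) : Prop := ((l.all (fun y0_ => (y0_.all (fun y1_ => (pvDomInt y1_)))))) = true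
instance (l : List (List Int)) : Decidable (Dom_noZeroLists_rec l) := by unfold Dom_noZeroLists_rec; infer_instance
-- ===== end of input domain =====

-- B replaces A's structural recursion by one iterative accumulator pass (idiomatic, same cost).

-- ===== PORT A =====
-- literal port of A: recursion on head/tail, prepend head if 0 not in it
def noZeroLists_rec (l : List (List Int)) : List (List Int) :=
  match l with
  | [] => []
  | head :: tail =>
    let tailRes := noZeroLists_rec tail
    if ¬ (0 ∈ head) then [head] ++ tailRes else tailRes

-- ===== PORT B =====
-- literal port of B: iterate over l, appending qualifying heads to the accumulator
def noZeroLists_rec_alt (l : List (List Int)) : List (List Int) :=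
  l.foldl (fun result head => if ¬ (0 ∈ head) then result ++ [head] else result) []

-- ===== PRECONDITION & SPEC =====
def Spec_noZeroLists_rec (l : List (List Int)) (out : List (List Int)) : Prop := out = noZeroLists_rec_alt l
instance (l : List (List Int)) (out : List (List Int)) : Decidable (Spec_noZeroLists_rec l out) := by unfold Spec_noZeroLists_rec; infer_instance

-- ===== CLAIM (what is proved, stated in full; the proofs are below) =====
def Claim_equal_noZeroLists_rec : Prop := ∀ (l : List (List Int)), Dom_noZeroLists_rec l → Spec_noZeroLists_rec l (noZeroLists_rec l)

-- ===== LEMMAS AND PROOFS =====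
theorem noZeroLists_rec_alt_acc (l : List (List Int)) (acc : List (List Int)) :
    l.foldl (fun result head => if ¬ (0 ∈ head) then result ++ [head] else result) acc
      = acc ++ noZeroLists_rec l := by
  induction l generalizing acc with
  | nil => simp [noZeroLists_rec]
  | cons h t ih =>
    rw [List.foldl_cons]
    show List.foldl _ (if ¬ (0 ∈ h) then acc ++ [h] else acc) t = _
    by_cases hz : (0:Int) ∈ h
    · rw [if_neg (by simpa using hz), ih, noZeroLists_rec, if_neg (by simpa using hz)]
    · rw [if_pos (by simpa using hz), ih, noZeroLists_rec, if_pos (by simpa using hz)]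
      simp

-- ===== VERDICT (by name: the statement is the Claim_ definition above) =====
theorem noZeroLists_rec_spec : Claim_equal_noZeroLists_rec := by
  intro l _
  unfold Spec_noZeroLists_rec noZeroLists_rec_alt
  rw [noZeroLists_rec_alt_acc, List.nil_append]
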